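-- pv_equiv track=rewrite | github.com/silvernuke911/Random-programs | longestword.py | not_only_numberletters
-- ===== SOURCE A (Python) =====
-- numberletters=list('acdfhjkmnpqrtuvwxyACDFHJKMNPQRTUVWXYZ')
--
-- def not_only_numberletters(testword):
--     x=0
--     for char in numberletters:
--         if char in testword:
--             x+=1
--     if x==0:
--         return False
--     else:
--         return True
-- ===== SOURCE B (Python) =====
-- allowed = set('acdfhjkmnpqrtuvwxyACDFHJKMNPQRTUVWXYZ')
--
-- def not_only_numberletters(testword):
--     return any(c in allowed for c in testword)
-- ===== Notes on version B (the rewrite author's own statement) =====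
-- stated objective: simpler
-- what changed: B makes a single pass over the characters of testword testing set membership in the constant allowed set, instead of A's loop over all 37 constant letters each doing a substring scan of testword and counting matches.
import Mathlib
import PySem

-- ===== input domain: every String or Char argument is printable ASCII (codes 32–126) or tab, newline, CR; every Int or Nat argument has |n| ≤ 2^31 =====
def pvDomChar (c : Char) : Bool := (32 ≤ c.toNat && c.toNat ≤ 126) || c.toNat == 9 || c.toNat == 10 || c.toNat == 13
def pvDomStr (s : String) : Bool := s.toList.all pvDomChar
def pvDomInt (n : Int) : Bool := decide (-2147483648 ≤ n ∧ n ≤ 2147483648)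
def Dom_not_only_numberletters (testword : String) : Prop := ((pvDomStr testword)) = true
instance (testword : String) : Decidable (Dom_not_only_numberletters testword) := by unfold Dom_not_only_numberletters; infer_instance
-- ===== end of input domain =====

-- B replaces A's loop over the 37 constant letters (each a substring scan of testword,
-- counted) by a single pass over testword's characters testing membership in the constant set.

-- ===== PORT A =====
-- numberletters = list('acdfhjkmnpqrtuvwxyACDFHJKMNPQRTUVWXYZ')
def numberletters : List Char := "acdfhjkmnpqrtuvwxyACDFHJKMNPQRTUVWXYZ".toList

def not_only_numberletters (testword : String) : Bool :=
  let x : Int := numberletters.foldl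
    (fun x char => if PySem.Str.isIn (String.ofList [char]) testword then x + 1 else x) 0
  if x == 0 then false else true

-- ===== PORT B =====
-- allowed = set('acdfhjkmnpqrtuvwxyACDFHJKMNPQRTUVWXYZ')
def pvAllowed : PySem.Set Char := PySem.Set.ofList "acdfhjkmnpqrtuvwxyACDFHJKMNPQRTUVWXYZ".toList

def not_only_numberletters_alt (testword : String) : Bool :=
  testword.toList.any (fun c => PySem.Set.contains pvAllowed c)

-- ===== PRECONDITION & SPEC =====
def Spec_not_only_numberletters (testword : String) (out : Bool) : Prop := out = not_only_numberletters_alt testword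
instance (testword : String) (out : Bool) : Decidable (Spec_not_only_numberletters testword out) := by unfold Spec_not_only_numberletters; infer_instance

-- ===== CLAIM (what is proved, stated in full; the proofs are below) =====
def Claim_equal_not_only_numberletters : Prop := ∀ (testword : String), Dom_not_only_numberletters testword → Spec_not_only_numberletters testword (not_only_numberletters testword)

-- ===== LEMMAS AND PROOFS =====

-- A's count is positive iff some constant letter occurs in the word.
theorem pvA_iff (w : String) :
    not_only_numberletters w = true ↔ ∃ c ∈ numberletters, c ∈ w.toList := by
  have hsing : ∀ c : Char, PySem.Str.isIn (String.ofList [c]) w = true ↔ c ∈ w.toList := by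
    intro c
    rw [PySem.Str.isIn_iff_infix, String.toList_ofList, List.singleton_infix_iff]
  unfold not_only_numberletters
  rw [PySem.List.foldl_count_if, zero_add]
  set n := numberletters.countP (fun char => PySem.Str.isIn (String.ofList [char]) w)
    with hn
  constructor
  · intro h
    have hpos : 0 < n := by
      by_contra hc
      have : n = 0 := by omega
      simp [this] at h
    obtain ⟨c, hc, hp⟩ := List.countP_pos_iff.mp hpos
    exact ⟨c, hc, (hsing c).mp hp⟩
  · rintro ⟨c, hc, hm⟩
    have hpos : 0 < n := List.countP_pos_iff.mpr ⟨c, hc, (hsing c).mpr hm⟩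
    have : ((n : Int) == 0) = false := by simp; omega
    simp [this]

-- B is true iff some character of the word is an allowed letter.
theorem pvB_iff (w : String) :
    not_only_numberletters_alt w = true ↔ ∃ c ∈ w.toList, c ∈ numberletters := by
  unfold not_only_numberletters_alt pvAllowed
  simp only [List.any_eq_true, PySem.Set.contains_iff, PySem.Set.mem_ofList]
  rfl

-- ===== VERDICT (by name: the statement is the Claim_ definition above) =====
theorem not_only_numberletters_spec : Claim_equal_not_only_numberletters := by
  intro w _
  unfold Spec_not_only_numberletters
  have : not_only_numberletters w = true ↔ not_only_numberletters_alt w = true := by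
    rw [pvA_iff, pvB_iff]
    exact ⟨fun ⟨c, h1, h2⟩ => ⟨c, h2, h1⟩, fun ⟨c, h1, h2⟩ => ⟨c, h2, h1⟩⟩
  cases hA : not_only_numberletters w <;> cases hB : not_only_numberletters_alt w <;>
    simp_all
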